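-- pv_equiv track=rewrite | github.com/EmreDemirelsLab/Python-Advanced | 03-Generators-and-Iterators/exercises.py | tumbling_window
-- ===== SOURCE A (Python) =====
-- from typing import Iterator, Iterable, Any, TypeVar, Callable
--
-- def tumbling_window(stream: Iterator, window_size: int) -> Iterator[list]:
--     """
--     Tumbling window (non-overlapping)
--
--     Her window bir sonraki window ile overlap etmez.
--
--     Example:
--         stream = range(10)
--         windows = tumbling_window(stream, 3)
--         # [[0,1,2], [3,4,5], [6,7,8], [9]]
--     """
--     window = []
--     for item in stream:
--         window.append(item)
--         if len(window) >= window_size: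
--             yield window
--             window = []
--
--     if window:
--         yield window
-- ===== SOURCE B (Python) =====
-- from itertools import islice
--
-- def tumbling_window(stream, window_size):
--     size = max(1, window_size)
--     it = iter(stream)
--     while True:
--         window = list(islice(it, size))
--         if not window:
--             return
--         yield window
-- ===== Notes on version B (the rewrite author's own statement) =====
-- stated objective: idiomatic
-- what changed: Replaces the manual append-and-flush accumulator with an explicit iterator consumed chunk-by-chunk via itertools.islice (window_size clamped to at least 1 so the degenerate non-positive case still yields single-item windows, as A does).
import Mathlib
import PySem

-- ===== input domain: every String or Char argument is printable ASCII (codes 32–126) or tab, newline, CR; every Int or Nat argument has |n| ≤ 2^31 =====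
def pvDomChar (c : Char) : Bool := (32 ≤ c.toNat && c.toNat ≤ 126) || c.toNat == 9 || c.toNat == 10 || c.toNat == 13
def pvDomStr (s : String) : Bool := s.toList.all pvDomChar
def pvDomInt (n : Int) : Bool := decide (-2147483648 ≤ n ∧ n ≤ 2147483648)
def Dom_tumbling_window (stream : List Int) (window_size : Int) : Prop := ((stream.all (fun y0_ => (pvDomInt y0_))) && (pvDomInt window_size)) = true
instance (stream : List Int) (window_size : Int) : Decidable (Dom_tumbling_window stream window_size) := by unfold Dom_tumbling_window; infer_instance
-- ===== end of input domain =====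

-- B: idiomatic chunk-grabbing re-implementation of the tumbling-window batcher (iterator + islice
-- instead of append-and-flush; window_size clamped to ≥ 1, matching A's singleton windows there).
-- Both Pythons are generators; equivalence is about the list of yielded windows.


-- ===== PORT A =====
-- one loop step of A: append item to the current window, flush when len(window) >= window_size
def twStep (window_size : Int) (st : List (List Int) × List Int) (item : Int) : List (List Int) × List Int :=
  let w := st.2 ++ [item]
  if window_size ≤ (w.length : Int) then (st.1 ++ [w], []) else (st.1, w)

-- final `if window: yield window`
def twFin (st : List (List Int) × List Int) : List (List Int) :=
  if st.2 ≠ [] then st.1 ++ [st.2] else st.1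

def tumbling_window (stream : List Int) (window_size : Int) : List (List Int) :=
  twFin (stream.foldl (twStep window_size) ([], []))

-- ===== PORT B =====
-- B's `while True: window = list(islice(it, size)); if not window: return; yield window`:
-- each round grabs the next `size = k+1 ≥ 1` elements (head plus k more, which makes the
-- recursion structurally decreasing; exact since size ≥ 1).
def twChunks (k : Nat) : List Int → List (List Int)
  | [] => []
  | x :: xs => (x :: xs.take k) :: twChunks k (xs.drop k)
  termination_by xs => xs.length
  decreasing_by simp

def tumbling_window_alt (stream : List Int) (window_size : Int) : List (List Int) :=
  let size : Int := max 1 window_size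
  twChunks (size - 1).toNat stream

-- ===== PRECONDITION & SPEC =====
def Spec_tumbling_window (stream : List Int) (window_size : Int) (out : List (List Int)) : Prop := out = tumbling_window_alt stream window_size
instance (stream : List Int) (window_size : Int) (out : List (List Int)) : Decidable (Spec_tumbling_window stream window_size out) := by unfold Spec_tumbling_window; infer_instance

-- ===== CLAIM (what is proved, stated in full; the proofs are below) =====
def Claim_equal_tumbling_window : Prop := ∀ (stream : List Int) (window_size : Int), Dom_tumbling_window stream window_size → Spec_tumbling_window stream window_size (tumbling_window stream window_size)

-- ===== LEMMAS AND PROOFS =====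

-- A's flush condition `len(window) >= window_size`, for a nonempty window, says the window
-- has reached size k+1 where k+1 = max 1 window_size.
theorem twCond_iff (ws : Int) (l : Nat) (hl : 1 ≤ l) :
    (ws ≤ (l : Int)) ↔ ((max 1 ws - 1).toNat + 1 ≤ l) := by
  omega

-- the already-emitted windows only get appended to: factor them out of the fold
theorem twFold_factor (ws : Int) : ∀ (xs : List Int) (out : List (List Int)) (w : List Int),
    List.foldl (twStep ws) (out, w) xs =
      (out ++ (List.foldl (twStep ws) ([], w) xs).1, (List.foldl (twStep ws) ([], w) xs).2) := by
  intro xs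
  induction xs with
  | nil => intro out w; simp
  | cons x rest ih =>
    intro out w
    simp only [List.foldl_cons, twStep]
    split
    · rw [ih (out ++ [w ++ [x]]) []]
      simp only [List.nil_append]
      rw [ih [w ++ [x]] []]
      simp
    · exact ih out (w ++ [x])

theorem twFin_factor (out A : List (List Int)) (w : List Int) :
    twFin (out ++ A, w) = out ++ twFin (A, w) := by
  unfold twFin; split <;> simp

-- run A's loop starting from a pending nonempty window w of size ≤ k: the first emitted window is
-- w filled up to size k+1 (or everything if the stream ends first), the rest is a fresh run
theorem twPending (ws : Int) (k : Nat) (hk : ∀ l : Nat, 1 ≤ l → ((ws ≤ (l : Int)) ↔ k + 1 ≤ l)) :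
    ∀ (xs : List Int) (w : List Int), 1 ≤ w.length → w.length ≤ k →
    twFin (List.foldl (twStep ws) ([], w) xs) =
      if xs.length + w.length ≤ k + 1 then [w ++ xs]
      else (w ++ xs.take (k + 1 - w.length)) ::
           twFin (List.foldl (twStep ws) ([], []) (xs.drop (k + 1 - w.length))) := by
  intro xs
  induction xs with
  | nil =>
    intro w h1 h2
    have hw : w ≠ [] := by cases w <;> simp_all
    have hcond : ([] : List Int).length + w.length ≤ k + 1 := by simp; omega
    rw [if_pos hcond]
    simp [twFin, hw]
  | cons x rest ih =>
    intro w h1 h2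
    simp only [List.foldl_cons, twStep]
    have hlen : (w ++ [x]).length = w.length + 1 := by simp
    by_cases hfl : w.length = k
    · -- the new element fills the window: flush
      have hc : ws ≤ (((w ++ [x]).length : Nat) : Int) := by
        rw [hlen, hk _ (by omega)]; omega
      rw [if_pos hc, twFold_factor, twFin_factor]
      by_cases hr : rest = []
      · subst hr
        have hcond : (x :: ([] : List Int)).length + w.length ≤ k + 1 := by simp; omega
        rw [if_pos hcond]
        simp [twFin]
      · have hrl : 1 ≤ rest.length := by cases rest <;> simp_all
        rw [if_neg (by simp; omega)]
        have h1' : k + 1 - w.length = 1 := by omega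
        rw [h1']
        simp
    · -- keep accumulating
      have hlt : w.length < k := lt_of_le_of_ne h2 hfl
      have hc : ¬ ws ≤ (((w ++ [x]).length : Nat) : Int) := by
        rw [hlen, hk _ (by omega)]; omega
      rw [if_neg hc]
      rw [ih (w ++ [x]) (by simp) (by simp; omega)]
      rw [hlen]
      have h2' : k + 1 - (w.length + 1) = k - w.length := by omega
      have htk : k + 1 - w.length = (k - w.length) + 1 := by omega
      rw [h2', htk]
      simp only [List.take_succ_cons, List.drop_succ_cons]
      by_cases hcnd : rest.length + (w.length + 1) ≤ k + 1
      · rw [if_pos hcnd, if_pos (by simp; omega)]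
        simp
      · rw [if_neg hcnd, if_neg (by simp; omega)]
        simp

theorem twMain (ws : Int) (k : Nat) (hk : ∀ l : Nat, 1 ≤ l → ((ws ≤ (l : Int)) ↔ k + 1 ≤ l)) :
    ∀ (xs : List Int), twFin (List.foldl (twStep ws) ([], []) xs) = twChunks k xs
  | [] => by rw [twChunks.eq_def]; simp [twFin]
  | x :: rest => by
    rw [twChunks.eq_def]
    simp only [List.foldl_cons, twStep, List.nil_append]
    by_cases hk0 : k = 0
    · subst hk0
      have hc : ws ≤ (([x] : List Int).length : Int) := by
        have := (hk 1 (le_refl 1)).mpr (by omega)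
        simpa using this
      rw [if_pos hc, twFold_factor, twFin_factor]
      rw [twMain ws 0 hk rest]
      simp
    · have hc : ¬ ws ≤ (([x] : List Int).length : Int) := by
        have h1 := hk 1 (le_refl 1)
        simp at h1 ⊢
        omega
      rw [if_neg hc]
      rw [twPending ws k hk rest [x] (by simp) (by simp; omega)]
      by_cases hcnd : rest.length + [x].length ≤ k + 1
      · rw [if_pos hcnd]
        have h1 : rest.take k = rest := List.take_of_length_le (by simp at hcnd; omega)
        have h2 : rest.drop k = [] := List.drop_eq_nil_of_le (by simp at hcnd; omega)
        rw [twChunks.eq_def]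
        simp [h1, h2]
      · rw [if_neg hcnd]
        simp only [List.length_singleton]
        have h1' : k + 1 - 1 = k := by omega
        rw [h1', twMain ws k hk (rest.drop k)]
        simp
  termination_by xs => xs.length
  decreasing_by all_goals simp

-- ===== VERDICT (by name: the statement is the Claim_ definition above) =====
theorem tumbling_window_spec : Claim_equal_tumbling_window := by
  intro stream ws _
  unfold Spec_tumbling_window tumbling_window tumbling_window_alt
  exact twMain ws (max 1 ws - 1).toNat (fun l hl => twCond_iff ws l hl) stream
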